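-- pv_equiv track=rewrite | github.com/dadecoza/Ardu14 | Tools/mk14message.py | create_program
-- ===== SOURCE A (Python) =====
-- code = [
--     0xc4, 0xd, 0x35, 0xc4, 0x31, 0xc4, 0xf, 0x36, 0xc4, 0x73, 0x32, 0xc4,
--     0x60, 0xc8, 0xf0, 0xc4, 0x7, 0x1, 0xc2, 0x80, 0xc9, 0x80, 0x8f, 0x1,
--     0xc4, 0xff, 0x2, 0x70, 0x94, 0xf3, 0xb8, 0xdf, 0x9c, 0xed, 0xc6, 0xff,
--     0x94, 0xe5, 0x90, 0xdd, 0x80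
-- ]
--
-- font = {
--     "a": 0x77, "b": 0x7c, "c": 0x39, "d": 0x5e, "e": 0x79, "f": 0x71,
--     "g": 0x6f, "h": 0x76, "i": 0x30, "j": 0x1e, "k": 0x76, "l": 0x38,
--     "m": 0x15, "n": 0x54, "o": 0x3f, "p": 0x73, "q": 0x67, "r": 0x50,
--     "s": 0x6d, "t": 0x78, "u": 0x3e, "v": 0x1c, "w": 0x2a, "x": 0x76,
--     "y": 0x6e, "z": 0x5b, "0": 0x3f, "1": 0x6, "2": 0x5b, "3": 0x4f,
--     "4": 0x66, "5": 0x6d, "6": 0x7d, "7": 0x7, "8": 0x7f, "9": 0x6f,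
--     " ": 0x40
-- }
--
-- def create_program(message):
--     outstr = ""
--     message += " "
--     program = code.copy()
--     data = []
--     for letter in [lt.lower() for lt in message[::-1]]:
--         if letter in font:
--             data.append(font[letter])
--     if (len(data) > 7):
--         data += data[:7]
--
--     program += data
--
--     endaddr = 0xF20 + len(program)
--     endhi = endaddr >> 8
--     endlo = endaddr & 0xff
--     program[6] = endhi
--     program[9] = endlo-8
--
--     chunks = []
--     tmp = []
--     for b in program:
--         tmp.append(b)
--         if not (len(tmp)) % 10:
--             chunks.append(tmp)
--             tmp = []
--     if tmp:
--         chunks.append(tmp)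
--
--     addr = 0xF20
--     for chunk in chunks:
--         length = len(chunk)
--         addrhi = addr >> 8
--         addrlo = addr & 0xff
--         rtype = 0
--         record = [length, addrhi, addrlo, rtype]
--         record += chunk
--         record.append((-sum(record)) & 0x0FF)
--         rstr = "".join([format(b, '02X') for b in record])
--         outstr += ":%s\n" % rstr
--         addr += length
--     outstr += ":00000001FF"
--     return outstr
-- ===== SOURCE B (Python) =====
-- code = [
--     0xc4, 0xd, 0x35, 0xc4, 0x31, 0xc4, 0xf, 0x36, 0xc4, 0x73, 0x32, 0xc4,
--     0x60, 0xc8, 0xf0, 0xc4, 0x7, 0x1, 0xc2, 0x80, 0xc9, 0x80, 0x8f, 0x1,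
--     0xc4, 0xff, 0x2, 0x70, 0x94, 0xf3, 0xb8, 0xdf, 0x9c, 0xed, 0xc6, 0xff,
--     0x94, 0xe5, 0x90, 0xdd, 0x80
-- ]
--
-- font = {
--     "a": 0x77, "b": 0x7c, "c": 0x39, "d": 0x5e, "e": 0x79, "f": 0x71,
--     "g": 0x6f, "h": 0x76, "i": 0x30, "j": 0x1e, "k": 0x76, "l": 0x38,
--     "m": 0x15, "n": 0x54, "o": 0x3f, "p": 0x73, "q": 0x67, "r": 0x50,
--     "s": 0x6d, "t": 0x78, "u": 0x3e, "v": 0x1c, "w": 0x2a, "x": 0x76,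
--     "y": 0x6e, "z": 0x5b, "0": 0x3f, "1": 0x6, "2": 0x5b, "3": 0x4f,
--     "4": 0x66, "5": 0x6d, "6": 0x7d, "7": 0x7, "8": 0x7f, "9": 0x6f,
--     " ": 0x40
-- }
--
--
-- def create_program(message):
--     program = code.copy()
--     data = [font[c] for c in (message + " ")[::-1].lower() if c in font]
--     if len(data) > 7:
--         data += data[:7]
--     program += data
--
--     endaddr = 0xF20 + len(program)
--     program[6] = endaddr >> 8
--     program[9] = (endaddr & 0xff) - 8
--
--     lines = []
--     addr = 0xF20
--     for i in range(0, len(program), 10):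
--         chunk = program[i:i + 10]
--         record = [len(chunk), addr >> 8, addr & 0xff, 0] + chunk
--         record.append((-sum(record)) & 0xff)
--         lines.append(":" + "".join(format(b, '02X') for b in record))
--         addr += len(chunk)
--     return "\n".join(lines) + "\n:00000001FF"
-- ===== Notes on version B (the rewrite author's own statement) =====
-- stated objective: simpler
-- what changed: Replaces the two-phase accumulator pipeline (grow tmp, flush into chunks on len%10, then a second loop over chunks) with a single slice-driven pass program[i:i+10] for i in range(0,len,10) that builds and formats each record directly, and assembles the output with str.join instead of repeated += ; the font pass becomes one filtering comprehension.
import Mathlib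
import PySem

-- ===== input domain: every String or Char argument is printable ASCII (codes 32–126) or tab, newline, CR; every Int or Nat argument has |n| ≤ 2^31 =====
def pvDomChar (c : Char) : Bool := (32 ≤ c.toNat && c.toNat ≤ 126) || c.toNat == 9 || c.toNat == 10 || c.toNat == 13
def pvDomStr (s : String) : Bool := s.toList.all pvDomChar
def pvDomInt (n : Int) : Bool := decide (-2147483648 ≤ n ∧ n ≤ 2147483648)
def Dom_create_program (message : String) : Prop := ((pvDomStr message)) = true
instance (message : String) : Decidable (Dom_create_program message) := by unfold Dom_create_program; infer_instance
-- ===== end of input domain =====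

-- B replaces A's accumulator chunking + second emit loop by one slice-driven pass with
-- str.join output assembly (objective: simpler); proved to return the same string.

-- ===== PORT A =====

-- shared module constants (both Pythons use the same `code` and `font`)
def pvCode : List Int :=
  [0xc4, 0xd, 0x35, 0xc4, 0x31, 0xc4, 0xf, 0x36, 0xc4, 0x73, 0x32, 0xc4,
   0x60, 0xc8, 0xf0, 0xc4, 0x7, 0x1, 0xc2, 0x80, 0xc9, 0x80, 0x8f, 0x1,
   0xc4, 0xff, 0x2, 0x70, 0x94, 0xf3, 0xb8, 0xdf, 0x9c, 0xed, 0xc6, 0xff,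
   0x94, 0xe5, 0x90, 0xdd, 0x80]

def pvFont : List (Char × Int) :=
  [('a', 0x77), ('b', 0x7c), ('c', 0x39), ('d', 0x5e), ('e', 0x79), ('f', 0x71),
   ('g', 0x6f), ('h', 0x76), ('i', 0x30), ('j', 0x1e), ('k', 0x76), ('l', 0x38),
   ('m', 0x15), ('n', 0x54), ('o', 0x3f), ('p', 0x73), ('q', 0x67), ('r', 0x50),
   ('s', 0x6d), ('t', 0x78), ('u', 0x3e), ('v', 0x1c), ('w', 0x2a), ('x', 0x76),
   ('y', 0x6e), ('z', 0x5b), ('0', 0x3f), ('1', 0x6), ('2', 0x5b), ('3', 0x4f),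
   ('4', 0x66), ('5', 0x6d), ('6', 0x7d), ('7', 0x7), ('8', 0x7f), ('9', 0x6f),
   (' ', 0x40)]

def pvHexDigit (n : Nat) : Char :=
  if n < 10 then Char.ofNat (48 + n) else Char.ofNat (55 + n)

def pvHexAux : Nat → List Char → List Char
  | 0, acc => acc
  | n + 1, acc => pvHexAux ((n + 1) / 16) (pvHexDigit ((n + 1) % 16) :: acc)
decreasing_by exact Nat.div_lt_self (Nat.succ_pos n) (by omega)

-- hand port of Python's format(b, '02X') (no PySem primitive): uppercase hex digits,
-- zero-padded to width 2; a negative b prints '-' then the hex of |b| (width already ≥ 2).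
def pvFmt02X (b : Int) : List Char :=
  if b < 0 then '-' :: pvHexAux (-b).toNat []
  else
    let h := if b = 0 then ['0'] else pvHexAux b.toNat []
    if h.length < 2 then '0' :: h else h

-- the body of A's `for b in program` chunking loop
def pvChunkStep (st : List (List Int) × List Int) (b : Int) : List (List Int) × List Int :=
  let tmp := st.2 ++ [b]
  if tmp.length % 10 == 0 then (st.1 ++ [tmp], []) else (st.1, tmp)

-- the body of A's `for chunk in chunks` record-emitting loop (state: outstr, addr)
def pvEmitStepA (st : List Char × Int) (chunk : List Int) : List Char × Int :=
  let length : Int := chunk.length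
  let addrhi := st.2 >>> (8 : Nat)
  let addrlo := PySem.Int.band st.2 0xFF
  let record := [length, addrhi, addrlo, 0] ++ chunk
  let record := record ++ [PySem.Int.band (-record.sum) 0xFF]
  let rstr := PySem.Chars.join [] (record.map pvFmt02X)
  (st.1 ++ (':' :: rstr) ++ ['\n'], st.2 + length)

def create_program (message : String) : String :=
  let msg := message.toList ++ [' ']                       -- message += " "
  -- msg[::-1] is msg.reverse (PySem.List.slice?_none_none_neg_one); str.lower of a
  -- one-char ASCII string is PySem.Chars.lowerChar of its character (exact on Dom)
  let data := (msg.reverse.map PySem.Chars.lowerChar).foldl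
      (fun data letter =>
        match pvFont.lookup letter with                     -- `letter in font` + font[letter]
        | some v => data ++ [v]
        | none => data) []
  let data := if 7 < data.length then data ++ data.take 7 else data
  let program := pvCode ++ data
  let endaddr : Int := 0xF20 + program.length
  let endhi := endaddr >>> (8 : Nat)
  let endlo := PySem.Int.band endaddr 0xFF
  let program := PySem.List.pySetD program 6 endhi          -- index 6 always in range
  let program := PySem.List.pySetD program 9 (endlo - 8)    -- index 9 always in range
  let cp := program.foldl pvChunkStep ([], [])
  let chunks := if cp.2 = [] then cp.1 else cp.1 ++ [cp.2]  -- `if tmp: chunks.append(tmp)`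
  let st := chunks.foldl pvEmitStepA ([], 0xF20)
  String.ofList (st.1 ++ ':' :: "00000001FF".toList)

-- ===== PORT B =====

-- the body of B's single `for i in range(0, len(program), 10)` pass (state: lines, addr)
def pvEmitStepB (program : List Int) (st : List (List Char) × Int) (i : Int) : List (List Char) × Int :=
  let chunk := PySem.List.slice program (some i) (some (i + 10))
  let record := [(chunk.length : Int), st.2 >>> (8 : Nat), PySem.Int.band st.2 0xFF, 0] ++ chunk
  let record := record ++ [PySem.Int.band (-record.sum) 0xFF]
  (st.1 ++ [':' :: PySem.Chars.join [] (record.map pvFmt02X)], st.2 + chunk.length)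

def create_program_alt (message : String) : String :=
  -- [font[c] for c in (message + " ")[::-1].lower() if c in font]
  let data := (PySem.Chars.lower ((message.toList ++ [' ']).reverse)).filterMap
      (fun c => pvFont.lookup c)
  let data := if 7 < data.length then data ++ data.take 7 else data
  let program := pvCode ++ data
  let endaddr : Int := 0xF20 + program.length
  let program := PySem.List.pySetD program 6 (endaddr >>> (8 : Nat))
  let program := PySem.List.pySetD program 9 (PySem.Int.band endaddr 0xFF - 8)
  let st := (PySem.List.pyRange 0 program.length 10).foldl (pvEmitStepB program) ([], 0xF20)
  String.ofList (PySem.Chars.join ['\n'] st.1 ++ '\n' :: ':' :: "00000001FF".toList)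

-- ===== PRECONDITION & SPEC =====
def Spec_create_program (message : String) (out : String) : Prop := out = create_program_alt message
instance (message : String) (out : String) : Decidable (Spec_create_program message out) := by unfold Spec_create_program; infer_instance

-- ===== CLAIM (what is proved, stated in full; the proofs are below) =====
def Claim_equal_create_program : Prop := ∀ (message : String), Dom_create_program message → Spec_create_program message (create_program message)

-- ===== LEMMAS AND PROOFS =====

-- the chunks of a list, ten at a time (proof-side characterisation of both loops)
def pvChunks (p : List Int) : List (List Int) :=
  if p = [] then [] else p.take 10 :: pvChunks (p.drop 10)
termination_by p.length
decreasing_by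
  have : 0 < p.length := List.length_pos_iff.mpr (by assumption)
  simp; omega

-- one Intel-HEX record line (without the trailing newline), as both ports build it
def pvLine (chunk : List Int) (addr : Int) : List Char :=
  let record := [(chunk.length : Int), addr >>> (8 : Nat), PySem.Int.band addr 0xFF, 0] ++ chunk
  let record := record ++ [PySem.Int.band (-record.sum) 0xFF]
  ':' :: PySem.Chars.join [] (record.map pvFmt02X)

def pvLines : List (List Int) → Int → List (List Char)
  | [], _ => []
  | c :: cs, addr => pvLine c addr :: pvLines cs (addr + (c.length : Int))

theorem pv_data_eq (l : List Char) (acc : List Int) :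
    l.foldl (fun data letter =>
        match pvFont.lookup letter with
        | some v => data ++ [v]
        | none => data) acc = acc ++ l.filterMap (fun c => pvFont.lookup c) := by
  induction l generalizing acc with
  | nil => simp
  | cons c cs ih =>
    simp only [List.foldl_cons, List.filterMap_cons]
    cases pvFont.lookup c <;> simp [ih]

theorem pv_setD_length (xs : List Int) (i v : Int) :
    (PySem.List.pySetD xs i v).length = xs.length := by
  unfold PySem.List.pySetD PySem.List.pySet?
  cases PySem.List.pyIdx? xs.length i <;> simp

theorem pv_chunkfold (p : List Int) : ∀ (chunks : List (List Int)) (tmp : List Int),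
    tmp.length < 10 →
    (let cp := p.foldl pvChunkStep (chunks, tmp)
     if cp.2 = [] then cp.1 else cp.1 ++ [cp.2]) = chunks ++ pvChunks (tmp ++ p) := by
  induction p with
  | nil =>
    intro chunks tmp h
    simp only [List.foldl_nil, List.append_nil]
    conv_rhs => rw [pvChunks]
    by_cases he : tmp = []
    · simp [he]
    · have t1 : tmp.take 10 = tmp := List.take_of_length_le (by omega)
      have t2 : tmp.drop 10 = [] := List.drop_eq_nil_of_le (by omega)
      rw [t2, pvChunks]
      simp [he, t1]
  | cons b bs ih =>
    intro chunks tmp h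
    simp only [List.foldl_cons]
    by_cases h9 : tmp.length = 9
    · have hc : pvChunkStep (chunks, tmp) b = (chunks ++ [tmp ++ [b]], []) := by
        simp [pvChunkStep, h9]
      rw [hc, ih _ _ (by simp)]
      have hlen : (tmp ++ [b]).length = 10 := by simp [h9]
      have hsplit : tmp ++ b :: bs = (tmp ++ [b]) ++ bs := by simp
      have t1 : ((tmp ++ [b]) ++ bs).take 10 = tmp ++ [b] := by
        rw [show (10 : Nat) = (tmp ++ [b]).length from hlen.symm]
        exact List.take_left
      have t2 : ((tmp ++ [b]) ++ bs).drop 10 = bs := by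
        rw [show (10 : Nat) = (tmp ++ [b]).length from hlen.symm]
        exact List.drop_left
      conv_rhs => rw [hsplit, pvChunks]
      rw [if_neg (by simp), t1, t2]
      simp
    · have hc : pvChunkStep (chunks, tmp) b = (chunks, tmp ++ [b]) := by
        have : ¬((tmp.length + 1) % 10 = 0) := by omega
        simp [pvChunkStep, this]
      rw [hc, ih _ _ (by simp; omega)]
      simp

theorem pv_emitA (chunks : List (List Int)) : ∀ (out : List Char) (addr : Int),
    (chunks.foldl pvEmitStepA (out, addr)).1
      = out ++ ((pvLines chunks addr).map (· ++ ['\n'])).flatten := by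
  induction chunks with
  | nil => intro out addr; simp [pvLines]
  | cons c cs ih =>
    intro out addr
    have hs : pvEmitStepA (out, addr) c = (out ++ pvLine c addr ++ ['\n'], addr + (c.length : Int)) := by
      simp [pvEmitStepA, pvLine]
    simp only [List.foldl_cons, hs, pvLines, List.map_cons, List.flatten_cons]
    rw [ih]
    simp

theorem pv_range_cons (a b s : Int) (hs : 0 < s) (h : a < b) :
    PySem.List.pyRange a b s = a :: PySem.List.pyRange (a + s) b s := by
  rw [PySem.List.pyRange_of_pos _ _ hs, PySem.List.pyRange_of_pos _ _ hs]
  by_cases h2 : a + s < b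
  · have e0 : (b - a + s - 1) / s = (b - (a + s) + s - 1) / s + 1 := by
      rw [show b - a + s - 1 = (b - (a + s) + s - 1) + 1 * s by ring,
        Int.add_mul_ediv_right _ _ (ne_of_gt hs)]
    have e2 : 0 ≤ (b - (a + s) + s - 1) / s := Int.ediv_nonneg (by omega) (by omega)
    have e1 : ((b - a + s - 1) / s).toNat = ((b - (a + s) + s - 1) / s).toNat + 1 := by omega
    rw [if_pos h, if_pos h2, e1, List.range_succ_eq_map]
    simp [List.map_map, Function.comp]
    intro k _; ring
  · have e1 : ((b - a + s - 1) / s).toNat = 1 := by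
      have l1 : 1 ≤ (b - a + s - 1) / s := by
        rw [Int.le_ediv_iff_mul_le hs]; omega
      have l2 : (b - a + s - 1) / s < 2 := by
        rw [Int.ediv_lt_iff_lt_mul hs]; omega
      omega
    rw [if_pos h, if_neg h2, e1]
    simp

theorem pv_emitB (P : List Int) (j : Nat) (out : List (List Char)) (addr : Int) :
    ((PySem.List.pyRange (j : Int) (P.length : Int) 10).foldl (pvEmitStepB P) (out, addr)).1
      = out ++ pvLines (pvChunks (P.drop j)) addr := by
  by_cases h : j < P.length
  · rw [pv_range_cons _ _ 10 (by omega) (by exact_mod_cast h)]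
    have hchunk : PySem.List.slice P (some (j : Int)) (some ((j : Int) + 10)) = (P.drop j).take 10 := by
      have := PySem.List.slice_natCast_add P j 10
      simpa using this
    have hs : pvEmitStepB P (out, addr) (j : Int)
        = (out ++ [pvLine ((P.drop j).take 10) addr], addr + (((P.drop j).take 10).length : Int)) := by
      simp [pvEmitStepB, pvLine, hchunk]
    rw [List.foldl_cons, hs]
    have hcast : ((j : Int) + 10) = ((j + 10 : Nat) : Int) := by push_cast; ring
    have hdd : P.drop (j + 10) = (P.drop j).drop 10 := by
      rw [List.drop_drop]
    rw [hcast, pv_emitB P (j + 10), hdd]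
    have hdj : P.drop j ≠ [] := by
      intro he
      have := List.drop_eq_nil_iff.mp he
      omega
    conv_rhs => rw [pvChunks]
    rw [if_neg hdj]
    simp [pvLines]
  · have hr : PySem.List.pyRange (j : Int) (P.length : Int) 10 = [] := by
      rw [PySem.List.pyRange_of_pos _ _ (by omega : (0:Int) < 10)]
      rw [if_neg (by exact_mod_cast h)]
      simp
    have hd : P.drop j = [] := List.drop_eq_nil_of_le (by omega)
    rw [hr, hd, pvChunks]
    simp [pvLines]
termination_by P.length - j
decreasing_by omega

theorem pv_join_newline (L : List (List Char)) (h : L ≠ []) :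
    ((L.map (· ++ ['\n'])).flatten) = PySem.Chars.join ['\n'] L ++ ['\n'] := by
  induction L with
  | nil => exact absurd rfl h
  | cons p rest ih =>
    cases rest with
    | nil => simp [PySem.Chars.join, List.intercalate]
    | cons q rest' =>
      rw [PySem.Chars.join_cons_cons]
      calc (List.map (fun x => x ++ ['\n']) (p :: q :: rest')).flatten
          = p ++ ['\n'] ++ (List.map (fun x => x ++ ['\n']) (q :: rest')).flatten := by simp
        _ = p ++ ['\n'] ++ (PySem.Chars.join ['\n'] (q :: rest') ++ ['\n']) := by
              rw [ih (by simp)]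
        _ = p ++ ['\n'] ++ PySem.Chars.join ['\n'] (q :: rest') ++ ['\n'] := by simp

theorem pv_chunks_ne_nil (p : List Int) (h : p ≠ []) : pvChunks p ≠ [] := by
  rw [pvChunks, if_neg h]; simp

theorem pv_lines_ne_nil (cs : List (List Int)) (addr : Int) (h : cs ≠ []) :
    pvLines cs addr ≠ [] := by
  cases cs with
  | nil => exact absurd rfl h
  | cons c cs' => simp [pvLines]

-- ===== VERDICT (by name: the statement is the Claim_ definition above) =====
theorem create_program_spec : Claim_equal_create_program := by
  intro message _
  unfold Spec_create_program create_program create_program_alt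
  dsimp only
  -- identical data: per-char lower + conditional append  =  lower of the list + filterMap
  rw [pv_data_eq]
  simp only [List.nil_append, PySem.Chars.lower]
  -- name the common program list P
  set data0 := ((message.toList ++ [' ']).reverse.map PySem.Chars.lowerChar).filterMap
      (fun c => pvFont.lookup c) with hdata0
  set data := if 7 < data0.length then data0 ++ data0.take 7 else data0 with hdata
  set P := PySem.List.pySetD
      (PySem.List.pySetD (pvCode ++ data) 6 ((0xF20 + ((pvCode ++ data).length : Int)) >>> (8 : Nat)))
      9 (PySem.Int.band (0xF20 + ((pvCode ++ data).length : Int)) 0xFF - 8) with hP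
  -- P is nonempty (pySetD preserves length; pvCode is nonempty)
  have hPne : P ≠ [] := by
    have hlen : P.length = (pvCode ++ data).length := by
      rw [hP, pv_setD_length, pv_setD_length]
    intro he
    rw [he] at hlen
    simp [pvCode] at hlen
  -- A's two loops produce pvLines (pvChunks P) 0xF20, newline-terminated and flattened
  have hA := pv_chunkfold P [] [] (by simp)
  dsimp only at hA
  simp only [List.nil_append] at hA
  rw [hA, pv_emitA]
  -- B's single pass produces the same lines
  have hB := pv_emitB P 0 [] 0xF20
  simp only [Nat.cast_zero, List.drop_zero, List.nil_append] at hB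
  rw [hB]
  -- both assemble the same string
  rw [pv_join_newline _ (pv_lines_ne_nil _ _ (pv_chunks_ne_nil _ hPne))]
  simp
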